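-- pv_equiv track=rewrite | github.com/danielladsouza/coding-challenge-prep | strings/shortest_completing_word.py | shortestCompletingWord_1
-- ===== SOURCE A (Python) =====
-- from typing import List
--
-- import string, copy
-- from collections import Counter, defaultdict
--
-- def shortestCompletingWord_1(licensePlate: str,
--                            words: List[str]) -> str:
--     # licensePlate
--     # Min, Count of the desired characters
--     # Ignore numbers, spaces, case insensitive
--
--     """get_desired_characters()
--     Iterate over words and get the candidate completing words
--     pick the first of the shortest of the completing words"""
--
--     licensePlateMap = defaultdict(
--         int)  # S.C. O(d) - length of the licensePlate string
--
--     licensePlate = licensePlate.lower()  # strings are immutable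
--
--     for c in licensePlate:  # T.C. O(d)
--         if c in string.ascii_lowercase:
--             licensePlateMap[c] += 1
--
--     # 1s3 PSt
--     # spst
--     # Keep track of the shortest completing word
--     result = None
--
--     # Analyze for Time complexity
--     # T.C. O(Nd)
--     for word in words:  # O(N)
--         ref_map = licensePlateMap.copy()  # Shallow copy - no Nested reference types
--         for c in word:  # O(d)
--             if c in ref_map:
--                 ref_map[c] -= 1
--
--         if max(ref_map.values()) > 0:
--             continue
--
--         if result == None:
--             result = word
--         if len(word) < len(result):
--             result = word
--
--     return result
-- ===== SOURCE B (Python) =====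
-- import string
-- from collections import defaultdict
-- from typing import List
--
-- def shortestCompletingWord_1(licensePlate: str, words: List[str]) -> str:
--     need = defaultdict(int)
--     for c in licensePlate.lower():
--         if c in string.ascii_lowercase:
--             need[c] += 1
--     for word in sorted(words, key=len):
--         if all(word.count(c) >= k for c, k in need.items()):
--             return word
--     return None
-- ===== Notes on version B (the rewrite author's own statement) =====
-- stated objective: alternative
-- what changed: B replaces A's single-pass running-minimum scan (with the copy-and-decrement remainder test) by a stable length-sort of words followed by returning the first word whose per-letter counts cover the plate's letter counts.
-- crash fix: On a licensePlate containing no ASCII letter together with a non-empty words list, A raises ValueError ('max() arg is an empty sequence'); B returns the first word of minimal length. — e.g. on shortestCompletingWord_1("12", ["ab", "c"]): A raises ValueError, B returns some "c"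
import Mathlib
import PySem

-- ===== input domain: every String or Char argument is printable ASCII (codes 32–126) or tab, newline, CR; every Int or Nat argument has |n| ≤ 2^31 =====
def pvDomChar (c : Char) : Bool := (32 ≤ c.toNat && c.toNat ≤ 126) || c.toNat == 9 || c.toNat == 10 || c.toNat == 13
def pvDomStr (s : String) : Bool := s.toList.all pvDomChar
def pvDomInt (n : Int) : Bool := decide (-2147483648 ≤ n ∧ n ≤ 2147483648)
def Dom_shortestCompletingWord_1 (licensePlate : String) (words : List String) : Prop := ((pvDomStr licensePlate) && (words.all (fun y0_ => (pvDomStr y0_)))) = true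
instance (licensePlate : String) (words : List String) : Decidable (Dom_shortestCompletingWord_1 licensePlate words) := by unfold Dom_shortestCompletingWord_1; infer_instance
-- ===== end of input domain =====

-- B replaces A's running-minimum scan with a stable length-sort followed by returning the
-- first completing word (objective: alternative decomposition; no speed claim).

-- ===== PORT A =====
-- string.ascii_lowercase; 'c in string.ascii_lowercase' on a single char c is exactly
-- membership of that char.
def pvAsciiLower : List Char := "abcdefghijklmnopqrstuvwxyz".toList

-- the plate-map builder: identical lines at the top of both Pythons
-- (defaultdict(int) counting the lowercase letters of licensePlate.lower()).
def pvPlateMap (licensePlate : String) : PySem.Dict Char Int :=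
  (PySem.Str.lower licensePlate).toList.foldl
    (fun d c => if pvAsciiLower.contains c then d.insert c (d.getD c 0 + 1) else d)
    PySem.Dict.empty

-- the body of A's 'for word in words' loop
def pvStepA (licensePlateMap : PySem.Dict Char Int) (result : Option String) (word : String) :
    Option String :=
  -- ref_map = licensePlateMap.copy(); for c in word: if c in ref_map: ref_map[c] -= 1
  let refMap := word.toList.foldl
    (fun d c => if d.contains c then d.insert c (d.getD c 0 - 1) else d) licensePlateMap
  match PySem.List.max? refMap.values (fun v => v) with
  | none => result   -- Python: max() on an empty sequence raises ValueError; excluded by Pre_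
  | some m =>
    if m > 0 then result
    else
      let result1 := if result = none then some word else result
      match result1 with
      | none => none   -- unreachable: result1 is always some
      | some r => if PySem.Str.len word < PySem.Str.len r then some word else some r

def shortestCompletingWord_1 (licensePlate : String) (words : List String) : Option String :=
  let licensePlateMap := pvPlateMap licensePlate
  words.foldl (pvStepA licensePlateMap) none

-- ===== PORT B =====
-- word.count(c) for a single-character needle c is the count of that character; exact.
def shortestCompletingWord_1_alt (licensePlate : String) (words : List String) : Option String :=
  let need := pvPlateMap licensePlate
  -- for word in sorted(words, key=len): if all(...): return word; return None
  (PySem.List.sorted words (fun w => PySem.Str.len w) false).find?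
    (fun word => need.items.all (fun ck => decide (ck.2 ≤ (word.toList.count ck.1 : Int))))

-- ===== PRECONDITION & SPEC =====
-- Pre_ excludes exactly the inputs where A raises ValueError (max() over the values of an
-- empty plate map): a licensePlate containing no ASCII letter together with non-empty words.
def Pre_shortestCompletingWord_1 (licensePlate : String) (words : List String) : Prop :=
  words = [] ∨ ((PySem.Str.lower licensePlate).toList.any (fun c => pvAsciiLower.contains c)) = true
instance (licensePlate : String) (words : List String) : Decidable (Pre_shortestCompletingWord_1 licensePlate words) := by unfold Pre_shortestCompletingWord_1; infer_instance

def pvWitness_shortestCompletingWord_1 : String × List String := ("aB1", ["x", "ab"])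

-- On a licensePlate with no ASCII letter and non-empty words, A raises ValueError
-- ('max() arg is an empty sequence'); B returns the first word of minimal length.
def Raises_shortestCompletingWord_1 (licensePlate : String) (words : List String) : Prop :=
  words ≠ [] ∧ ((PySem.Str.lower licensePlate).toList.any (fun c => pvAsciiLower.contains c)) = false
instance (licensePlate : String) (words : List String) : Decidable (Raises_shortestCompletingWord_1 licensePlate words) := by unfold Raises_shortestCompletingWord_1; infer_instance
def pvRaiseWitness_shortestCompletingWord_1 : String × List String := ("12", ["ab", "c"])
def pvRaiseWitnessOut_shortestCompletingWord_1 : Option String := some "c"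

def Spec_shortestCompletingWord_1 (licensePlate : String) (words : List String) (out : Option String) : Prop := out = shortestCompletingWord_1_alt licensePlate words
instance (licensePlate : String) (words : List String) (out : Option String) : Decidable (Spec_shortestCompletingWord_1 licensePlate words out) := by unfold Spec_shortestCompletingWord_1; infer_instance

-- ===== CLAIM (what is proved, stated in full; the proofs are below) =====
def Claim_equal_shortestCompletingWord_1 : Prop := ∀ (licensePlate : String) (words : List String), Dom_shortestCompletingWord_1 licensePlate words → Pre_shortestCompletingWord_1 licensePlate words → Spec_shortestCompletingWord_1 licensePlate words (shortestCompletingWord_1 licensePlate words)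

def Claim_raises_shortestCompletingWord_1 : Prop := (∀ (licensePlate : String) (words : List String), Dom_shortestCompletingWord_1 licensePlate words → Raises_shortestCompletingWord_1 licensePlate words → ¬ Pre_shortestCompletingWord_1 licensePlate words) ∧ (Dom_shortestCompletingWord_1 (pvRaiseWitness_shortestCompletingWord_1.1) (pvRaiseWitness_shortestCompletingWord_1.2) ∧ Raises_shortestCompletingWord_1 (pvRaiseWitness_shortestCompletingWord_1.1) (pvRaiseWitness_shortestCompletingWord_1.2) ∧ shortestCompletingWord_1_alt (pvRaiseWitness_shortestCompletingWord_1.1) (pvRaiseWitness_shortestCompletingWord_1.2) = pvRaiseWitnessOut_shortestCompletingWord_1)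

-- ===== LEMMAS AND PROOFS =====

-- B's completing test and the canonical 'keep the better candidate' step (proof-only helpers).
def pvCov (d : PySem.Dict Char Int) (w : String) : Bool :=
  d.items.all (fun ck => decide (ck.2 ≤ (w.toList.count ck.1 : Int)))

def pvUpd (r : Option String) (w : String) : Option String :=
  match r with
  | none => some w
  | some v => if PySem.Str.len w < PySem.Str.len v then some w else some v

-- A's inner decrement loop: keys are unchanged and each key's value drops by the char count.
theorem pvDec_spec (l : List Char) (d : PySem.Dict Char Int) :
    (l.foldl (fun d c => if d.contains c then d.insert c (d.getD c 0 - 1) else d) d).keys = d.keys ∧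
    ∀ k, (l.foldl (fun d c => if d.contains c then d.insert c (d.getD c 0 - 1) else d) d).getD k 0
      = if d.contains k then d.getD k 0 - l.count k else d.getD k 0 := by
  induction l generalizing d with
  | nil => simp
  | cons c t ih =>
    simp only [List.foldl_cons]
    by_cases hc : d.contains c = true
    · rw [if_pos hc]
      obtain ⟨ihk, ihv⟩ := ih (d.insert c (d.getD c 0 - 1))
      constructor
      · rw [ihk, PySem.Dict.keys_insert_of_contains d _ hc]
      · intro k
        rw [ihv k, PySem.Dict.contains_insert, PySem.Dict.getD_insert]
        by_cases hk : k = c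
        · subst hk
          simp [hc]
          omega
        · have : t.count k = (c :: t).count k := by
            simp [Ne.symm hk]
          rw [this]; simp [hk]
    · rw [if_neg hc]
      obtain ⟨ihk, ihv⟩ := ih d
      refine ⟨ihk, fun k => ?_⟩
      rw [ihv k]
      by_cases hk : k = c
      · subst hk; simp [hc]
      · by_cases hdk : d.contains k = true <;>
          simp [hdk, Ne.symm hk]

-- A's loop body, on a dict with distinct keys and at least one key, keeps the better
-- candidate exactly among B's completing words.
theorem pvStepA_eq (d : PySem.Dict Char Int) (hnd : d.keys.Nodup) (hne : d.keys ≠ [])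
    (r : Option String) (w : String) :
    pvStepA d r w = if pvCov d w then pvUpd r w else r := by
  unfold pvStepA
  obtain ⟨hkeys, hval⟩ := pvDec_spec w.toList d
  set e := w.toList.foldl (fun d c => if d.contains c then d.insert c (d.getD c 0 - 1) else d) d with he
  have hndE : e.keys.Nodup := by rw [hkeys]; exact hnd
  have hvals : e.values = d.keys.map (fun k => d.getD k 0 - (w.toList.count k : Int)) := by
    rw [PySem.Dict.values_eq_map_keys e hndE 0, hkeys]
    apply List.map_congr_left
    intro k hkmem
    rw [hval k, if_pos ((PySem.Dict.contains_iff_mem_keys d k).mpr hkmem)]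
  have hvne : e.values ≠ [] := by
    rw [hvals]
    simpa using hne
  cases hmax : PySem.List.max? e.values (fun v => v) with
  | none => exact absurd ((PySem.List.max?_eq_none_iff _ _).mp hmax) hvne
  | some m =>
    simp only [hmax]
    have hmem : m ∈ e.values := PySem.List.max?_mem hmax
    have hmaxle : ∀ y ∈ e.values, y ≤ m := fun y hy => PySem.List.max?_isMax hmax y hy
    have hcov : pvCov d w = true ↔ m ≤ 0 := by
      unfold pvCov
      rw [PySem.Dict.items_eq_map_keys d hnd 0, List.all_map]
      constructor
      · intro hall
        rw [hvals] at hmem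
        obtain ⟨k, hk, hkm⟩ := List.mem_map.mp hmem
        have h2 := List.all_eq_true.mp hall k hk
        simp at h2
        omega
      · intro hm0
        rw [List.all_eq_true]
        intro k hk
        have h3 : d.getD k 0 - (w.toList.count k : Int) ≤ m := by
          apply hmaxle
          rw [hvals]
          exact List.mem_map_of_mem hk
        simp
        omega
    by_cases hc : pvCov d w = true
    · rw [if_pos hc]
      have hm0 : ¬ m > 0 := by have := hcov.mp hc; omega
      rw [if_neg hm0]
      cases r with
      | none => simp [pvUpd]
      | some v => simp [pvUpd]
    · rw [if_neg hc]
      have : m > 0 := by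
        by_contra h
        exact hc (hcov.mpr (by omega))
      rw [if_pos this]

-- inserting w into a length-sorted list commutes with taking the first match.
theorem pvFind_insertBy (p : String → Bool) (w : String) (s : List String)
    (hs : s.Pairwise (fun a b => PySem.Str.len a ≤ PySem.Str.len b)) :
    (PySem.List.insertBy (fun a b => decide (PySem.Str.len a < PySem.Str.len b)) w s).find? p
      = if p w then pvUpd (s.find? p) w else s.find? p := by
  induction s with
  | nil =>
    by_cases hp : p w = true <;> simp [PySem.List.insertBy, List.find?, hp, pvUpd]
  | cons y ys ih =>
    obtain ⟨hy, hys⟩ := List.pairwise_cons.mp hs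
    have hins : PySem.List.insertBy (fun a b => decide (PySem.Str.len a < PySem.Str.len b)) w (y :: ys)
        = if decide (PySem.Str.len w < PySem.Str.len y) = true then w :: y :: ys
          else y :: PySem.List.insertBy (fun a b => decide (PySem.Str.len a < PySem.Str.len b)) w ys := rfl
    by_cases hlt : PySem.Str.len w < PySem.Str.len y
    · rw [hins, if_pos (by simpa using hlt)]
      by_cases hp : p w = true
      · rw [if_pos hp]
        cases hf : (y :: ys).find? p with
        | none => simp [hp, pvUpd]
        | some v =>
          have hvmem : v ∈ y :: ys := List.mem_of_find?_eq_some hf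
          have hlv : PySem.Str.len w < PySem.Str.len v := by
            rcases List.mem_cons.mp hvmem with h | h
            · rwa [h]
            · exact lt_of_lt_of_le hlt (hy v h)
          have hlv' : w.length < v.length := by simpa using hlv
          simp [hp, pvUpd]
          intro h
          exact absurd hlv' (by omega)
      · rw [if_neg hp]
        simp [List.find?_cons, hp]
    · rw [hins, if_neg (by simpa using hlt)]
      by_cases hpy : p y = true
      · simp only [List.find?_cons, hpy]
        have hlt' : ¬ w.length < y.length := by simpa using hlt
        by_cases hp : p w = true <;> simp [hp, pvUpd]
        intro h
        exact absurd h hlt'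
      · simp [hpy]
        simpa using ih hys

-- running-minimum fold = first match in the stable length-sorted list.
theorem pvFold_find (p : String → Bool) (ws : List String) :
    ws.foldl (fun r w => if p w then pvUpd r w else r) none
      = (PySem.List.sorted ws (fun w => PySem.Str.len w) false).find? p := by
  induction ws using List.reverseRecOn with
  | nil => rw [PySem.List.sorted_eq_foldl_insertBy]; simp
  | append_singleton ws w ih =>
    rw [List.foldl_append, List.foldl_cons, List.foldl_nil, ih]
    rw [PySem.List.sorted_eq_foldl_insertBy (ws ++ [w]), List.foldl_append, List.foldl_cons,
      List.foldl_nil, ← PySem.List.sorted_eq_foldl_insertBy ws]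
    rw [pvFind_insertBy p w _ (PySem.List.sorted_pairwise ws (fun w => PySem.Str.len w))]

theorem pvPlate_keys (licensePlate : String) :
    (pvPlateMap licensePlate).keys
      = PySem.Set.ofList (((PySem.Str.lower licensePlate).toList).filter (fun c => pvAsciiLower.contains c)) := by
  unfold pvPlateMap
  simp only [PySem.List.foldl_if_eq_foldl_filter]
  rw [PySem.Dict.keys_foldl_insert]
  rfl

theorem pvPlate_nodup (licensePlate : String) : (pvPlateMap licensePlate).keys.Nodup := by
  unfold pvPlateMap
  simp only [PySem.List.foldl_if_eq_foldl_filter]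
  exact PySem.Dict.nodup_keys_foldl_insert _ _ _ (by simp)

-- ===== VERDICT (by name: the statement is the Claim_ definition above) =====
theorem shortestCompletingWord_1_spec : Claim_equal_shortestCompletingWord_1 := by
  intro lp ws _ hpre
  unfold Spec_shortestCompletingWord_1
  unfold shortestCompletingWord_1 shortestCompletingWord_1_alt
  rcases hpre with hws | hany
  · subst hws; rfl
  · have hnd := pvPlate_nodup lp
    have hne : (pvPlateMap lp).keys ≠ [] := by
      rw [pvPlate_keys]
      obtain ⟨c, hcmem, hcp⟩ := List.any_eq_true.mp hany
      have h1 : c ∈ ((PySem.Str.lower lp).toList).filter (fun c => pvAsciiLower.contains c) :=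
        List.mem_filter.mpr ⟨hcmem, hcp⟩
      exact List.ne_nil_of_mem ((PySem.Set.mem_ofList _ _).mpr h1)
    have hstep : pvStepA (pvPlateMap lp) = fun r w => if pvCov (pvPlateMap lp) w then pvUpd r w else r :=
      funext fun r => funext fun w => pvStepA_eq _ hnd hne r w
    show ws.foldl (pvStepA (pvPlateMap lp)) none = _
    rw [hstep, pvFold_find]
    rfl

@[simp]
theorem shortestCompletingWord_1_raises : Claim_raises_shortestCompletingWord_1 := by
  unfold Claim_raises_shortestCompletingWord_1
  refine ⟨?_, by decide⟩
  intro lp ws _ hr hpre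
  obtain ⟨h1, h2⟩ := hr
  rcases hpre with h | h
  · exact h1 h
  · rw [h2] at h; cases h
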